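-- pv_equiv track=rewrite | github.com/thealper2/codewars-solutions | 7-kyu/simple_letter_removal.py | solve
-- ===== SOURCE A (Python) =====
-- def solve(s, k):
--     for c in range(ord('a'), ord('z') + 1):
--         char = chr(c)
--         while k > 0 and char in s:
--             index = s.index(char)
--             s = s[:index] + s[index + 1:]
--             k -= 1
--             if k == 0:
--                 break
--
--         if k == 0:
--             break
--
--     return s
-- ===== SOURCE B (Python) =====
-- def solve(s, k):
--     # Count letter frequencies once, assign removals a->z, then one pass
--     # skipping the first t occurrences of each letter.  O(n) overall.
--     cnt = {}
--     for ch in s: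
--         cnt[ch] = cnt.get(ch, 0) + 1
--     rem = k
--     skip = {}
--     for o in range(ord('a'), ord('z') + 1):
--         if rem <= 0:
--             break
--         c = chr(o)
--         t = min(rem, cnt.get(c, 0))
--         if t > 0:
--             skip[c] = t
--         rem -= t
--     out = []
--     for ch in s:
--         if skip.get(ch, 0) > 0:
--             skip[ch] = skip[ch] - 1
--         else:
--             out.append(ch)
--     return ''.join(out)
-- ===== Notes on version B (the rewrite author's own statement) =====
-- stated objective: faster
-- what changed: A repeatedly searches and slices the string once per removed character (letter by letter); B counts letter frequencies once, assigns each letter a..z its removal budget, and emits the result in a single pass that skips the first budgeted occurrences of each letter.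
import Mathlib
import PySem

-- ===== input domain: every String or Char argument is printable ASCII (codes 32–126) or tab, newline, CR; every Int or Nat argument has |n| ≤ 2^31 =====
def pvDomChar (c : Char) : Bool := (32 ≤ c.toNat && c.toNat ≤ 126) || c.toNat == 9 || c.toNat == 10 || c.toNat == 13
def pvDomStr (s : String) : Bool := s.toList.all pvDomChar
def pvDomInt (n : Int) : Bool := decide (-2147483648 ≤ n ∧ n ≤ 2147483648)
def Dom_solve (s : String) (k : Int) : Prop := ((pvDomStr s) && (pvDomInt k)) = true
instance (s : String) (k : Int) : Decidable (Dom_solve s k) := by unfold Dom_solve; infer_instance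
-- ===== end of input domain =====

-- B replaces A's repeated index-and-slice deletions (O(k·n)) by one frequency count,
-- a removal budget per letter a..z, and a single skipping pass (O(n)).

-- ===== PORT A =====
-- inner `while k > 0 and char in s:` loop; strings handled as their char lists
-- (single-char `in`/`index`/slicing are exact on the list side).
def solveInner (c : Char) (s : List Char) (k : Int) : List Char × Int :=
  if h : 0 < k ∧ c ∈ s then
    let i : Nat := (PySem.List.index? s c).getD 0        -- s.index(char)
    let s' := PySem.List.slice s none (some (i : Int)) ++
              PySem.List.slice s (some ((i : Int) + 1)) none   -- s[:index] + s[index+1:]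
    if k - 1 == 0 then (s', k - 1) else solveInner c s' (k - 1)
  else (s, k)
termination_by k.toNat
decreasing_by omega

-- outer `for c in range(ord('a'), ord('z')+1):` with the trailing `if k == 0: break`
def solveLoop : List Int → List Char × Int → List Char × Int
  | [], st => st
  | o :: os, (s, k) =>
    let st' := solveInner (Char.ofNat o.toNat) s k        -- char = chr(c); while-loop
    if st'.2 == 0 then st' else solveLoop os st'

def solve (s : String) (k : Int) : String :=
  String.ofList (solveLoop (PySem.List.pyRange 97 123 1) (s.toList, k)).1

-- ===== PORT B =====
-- cnt = {}; for ch in s: cnt[ch] = cnt.get(ch, 0) + 1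
def altCount (l : List Char) : PySem.Dict Char Int :=
  l.foldl (fun d x => d.insert x (d.getD x 0 + 1)) PySem.Dict.empty

-- for o in range(ord('a'), ord('z')+1): budget loop building the skip dict
def altSkip : List Int → PySem.Dict Char Int → Int → PySem.Dict Char Int → PySem.Dict Char Int
  | [], _, _, sk => sk
  | o :: os, cnt, rem, sk =>
    if rem ≤ 0 then sk
    else
      let c := Char.ofNat o.toNat
      let t := min rem (cnt.getD c 0)
      altSkip os cnt (rem - t) (if 0 < t then sk.insert c t else sk)

-- final pass: emit ch unless skip[ch] > 0 (then decrement)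
def altPass : PySem.Dict Char Int → List Char → List Char
  | _, [] => []
  | sk, x :: xs =>
    if 0 < sk.getD x 0 then altPass (sk.insert x (sk.getD x 0 - 1)) xs
    else x :: altPass sk xs

def solve_alt (s : String) (k : Int) : String :=
  String.ofList (altPass (altSkip (PySem.List.pyRange 97 123 1) (altCount s.toList) k PySem.Dict.empty) s.toList)

-- ===== PRECONDITION & SPEC =====
def Spec_solve (s : String) (k : Int) (out : String) : Prop := out = solve_alt s k
instance (s : String) (k : Int) (out : String) : Decidable (Spec_solve s k out) := by unfold Spec_solve; infer_instance

-- ===== CLAIM (what is proved, stated in full; the proofs are below) =====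
def Claim_equal_solve : Prop := ∀ (s : String) (k : Int), Dom_solve s k → Spec_solve s k (solve s k)

-- ===== LEMMAS AND PROOFS =====

-- middle spec: skip the first (f x) occurrences of each char x
def passF (f : Char → Int) : List Char → List Char
  | [] => []
  | x :: xs => if 0 < f x then passF (Function.update f x (f x - 1)) xs else x :: passF f xs

-- per-letter budgets computed from the ORIGINAL string's counts
def skipFun (s : List Char) : List Int → Int → Char → Int
  | [], _ => fun _ => 0
  | o :: os, k =>
    if k ≤ 0 then fun _ => 0
    else
      let c := Char.ofNat o.toNat
      let t := min k (s.count c : Int)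
      fun x => (if x = c then t else 0) + skipFun s os (k - t) x

lemma passF_nonpos (f : Char → Int) (hf : ∀ x, f x ≤ 0) (l : List Char) : passF f l = l := by
  induction l generalizing f with
  | nil => rfl
  | cons x xs ih =>
    simp only [passF, if_neg (by have := hf x; omega : ¬ 0 < f x)]
    exact congrArg (x :: ·) (ih f hf)

lemma passF_passF (f g : Char → Int) (hf : ∀ x, 0 ≤ f x) (hg : ∀ x, 0 ≤ g x) (l : List Char) :
    passF f (passF g l) = passF (fun x => f x + g x) l := by
  induction l generalizing f g with
  | nil => rfl
  | cons x xs ih =>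
    by_cases hgx : 0 < g x
    · simp only [passF, if_pos hgx, if_pos (by have := hf x; omega : 0 < f x + g x)]
      rw [ih f (Function.update g x (g x - 1)) hf
        (fun y => by by_cases hy : y = x <;> simp [Function.update, hy] <;> first | omega | exact hg y)]
      congr 1
      funext y
      by_cases hy : y = x <;> simp [Function.update, hy] <;> omega
    · simp only [passF, if_neg hgx]
      by_cases hfx : 0 < f x
      · simp only [if_pos hfx, if_pos (by have := hg x; omega : 0 < f x + g x)]
        rw [ih (Function.update f x (f x - 1)) g
          (fun y => by by_cases hy : y = x <;> simp [Function.update, hy] <;> first | omega | exact hf y) hg]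
        congr 1
        funext y
        by_cases hy : y = x <;> simp [Function.update, hy] <;> omega
      · simp only [if_neg hfx, if_neg (by have := hf x; have := hg x; omega : ¬ 0 < f x + g x)]
        exact congrArg (x :: ·) (ih f g hf hg)

lemma count_passF (f : Char → Int) (c : Char) (hc : f c ≤ 0) (l : List Char) :
    (passF f l).count c = l.count c := by
  induction l generalizing f with
  | nil => rfl
  | cons x xs ih =>
    by_cases hfx : 0 < f x
    · have hxc : x ≠ c := fun h => by subst h; omega
      simp only [passF, if_pos hfx]
      rw [ih (Function.update f x (f x - 1)) (by simp [Function.update, hxc.symm]; exact hc)]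
      simp [hxc]
    · simp only [passF, if_neg hfx]
      simp [List.count_cons, ih f hc]

lemma erase_eq_passF_single (c : Char) (l : List Char) :
    l.erase c = passF (fun x => if x = c then 1 else 0) l := by
  induction l with
  | nil => rfl
  | cons x xs ih =>
    rw [List.erase_cons]
    by_cases hx : x = c
    · subst hx
      simp only [BEq.rfl, if_pos, passF, if_pos]
      exact (passF_nonpos _ (fun y => by by_cases hy : y = x <;> simp [Function.update, hy]) xs).symm
    · simp only [beq_iff_eq, if_neg hx, passF]
      rw [if_neg (by omega : ¬ (0:Int) < 0)]
      exact congrArg (x :: ·) ih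

lemma index?_getD_eq_idxOf (c : Char) (l : List Char) (h : c ∈ l) :
    (PySem.List.index? l c).getD 0 = l.idxOf c := by
  induction l with
  | nil => cases h
  | cons x xs ih =>
    by_cases hx : x = c
    · subst hx
      rw [PySem.List.index?_cons_self, List.idxOf_cons_self]
      rfl
    · have hc : c ∈ xs := by cases h with | head => exact absurd rfl hx | tail _ h => exact h
      rw [PySem.List.index?_cons_of_ne _ hx, List.idxOf_cons_ne _ hx]
      obtain ⟨k, hk⟩ := Option.isSome_iff_exists.mp ((PySem.List.index?_isSome_iff _ _).mpr hc)
      have := ih hc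
      rw [hk] at this ⊢
      simpa using this

lemma slice_erase (c : Char) (s : List Char) (h : c ∈ s) :
    PySem.List.slice s none (some (((PySem.List.index? s c).getD 0 : Nat) : Int)) ++
      PySem.List.slice s (some ((((PySem.List.index? s c).getD 0 : Nat) : Int) + 1)) none =
      passF (fun x => if x = c then 1 else 0) s := by
  rw [index?_getD_eq_idxOf c s h, PySem.List.slice_to_natCast,
    PySem.List.slice_from s (show (0:Int) ≤ (s.idxOf c : Int) + 1 by omega)]
  have h1 : ((s.idxOf c : Int) + 1).toNat = s.idxOf c + 1 := by omega
  rw [h1, ← List.eraseIdx_eq_take_drop_succ, ← List.erase_eq_eraseIdx_of_idxOf,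
    erase_eq_passF_single]
  rfl

lemma count_passF_single_self (c : Char) (l : List Char) (h : c ∈ l) :
    ((passF (fun x => if x = c then 1 else 0) l).count c : Int) = (l.count c : Int) - 1 := by
  rw [← erase_eq_passF_single c l, List.count_erase_self]
  have : 1 ≤ l.count c := List.count_pos_iff.mpr h
  push_cast [this]
  ring

lemma solveInner_eq (c : Char) (s : List Char) (k : Int) :
    0 < k → solveInner c s k =
      (passF (fun x => if x = c then min k (s.count c : Int) else 0) s,
       k - min k (s.count c : Int)) := by
  induction s, k using solveInner.induct (c := c) with
  | case1 s k h hk1 =>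
    intro hk
    obtain ⟨hk0, hmem⟩ := h
    have hcnt : (1:Int) ≤ (s.count c : Int) := by
      have := List.count_pos_iff.mpr hmem
      omega
    have hmin : min k (s.count c : Int) = 1 := by
      have : k - 1 = 0 := by simpa using hk1
      omega
    rw [solveInner, dif_pos ⟨hk0, hmem⟩, if_pos hk1, hmin, ← slice_erase c s hmem]
  | case2 s k h i s' hk1 ih =>
    intro hk
    obtain ⟨hk0, hmem⟩ := h
    have hcnt : (1:Int) ≤ (s.count c : Int) := by
      have := List.count_pos_iff.mpr hmem
      omega
    have hkne : k - 1 ≠ 0 := fun h0 => hk1 (by simp [h0])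
    have hk2 : (0:Int) < k - 1 := by omega
    rw [solveInner, dif_pos ⟨hk0, hmem⟩, if_neg hk1, ih hk2]
    have hs' : s' = passF (fun x => if x = c then 1 else 0) s := slice_erase c s hmem
    rw [hs',
      count_passF_single_self c s hmem,
      passF_passF _ _ ?hf ?hg]
    case hf => intro y; by_cases hy : y = c <;> simp [hy]; exact ⟨by omega, hmem⟩
    case hg => intro y; by_cases hy : y = c <;> simp [hy]
    have hm : min (k-1) ((s.count c : Int) - 1) + 1 = min k (s.count c : Int) := by omega
    simp only [Prod.mk.injEq]
    refine ⟨?_, by omega⟩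
    congr 1
    funext y
    by_cases hy : y = c
    · simpa [hy] using hm
    · simp [hy]
  | case3 s k h =>
    intro hk
    have hmem : c ∉ s := fun hc => h ⟨hk, hc⟩
    have hcnt : s.count c = 0 := List.count_eq_zero.mpr hmem
    have hmin : min k ((s.count c : Int)) = 0 := by rw [hcnt]; simp; omega
    rw [solveInner, dif_neg h, hmin]
    simp only [Prod.mk.injEq]
    exact ⟨(passF_nonpos _ (fun y => by by_cases hy : y = c <;> simp [hy]) s).symm, by omega⟩

lemma skipFun_nonpos (s : List Char) (os : List Int) (k : Int) (hk : k ≤ 0) :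
    skipFun s os k = fun _ => 0 := by
  cases os with
  | nil => rfl
  | cons o os => simp only [skipFun, if_pos hk]

lemma skipFun_nonneg (s : List Char) (os : List Int) (k : Int) (x : Char) :
    0 ≤ skipFun s os k x := by
  induction os generalizing k with
  | nil => simp [skipFun]
  | cons o os ih =>
    by_cases hk : k ≤ 0
    · simp [skipFun, hk]
    · simp only [skipFun, if_neg hk]
      have h1 : (0:Int) ≤ min k (s.count (Char.ofNat o.toNat) : Int) := by
        have : (0:Int) ≤ (s.count (Char.ofNat o.toNat) : Int) := Int.natCast_nonneg _
        omega
      have h2 := ih (k - min k (s.count (Char.ofNat o.toNat) : Int))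
      split_ifs <;> omega

lemma skipFun_congr (s s' : List Char) (os : List Int) (k : Int)
    (h : ∀ o ∈ os, s'.count (Char.ofNat o.toNat) = s.count (Char.ofNat o.toNat)) :
    skipFun s' os k = skipFun s os k := by
  induction os generalizing k with
  | nil => rfl
  | cons o os ih =>
    simp only [skipFun]
    split
    · rfl
    · rw [h o List.mem_cons_self, ih _ (fun o' ho' => h o' (List.mem_cons_of_mem _ ho'))]

lemma solveLoop_eq (os : List Int) (s : List Char) (k : Int)
    (hnd : (os.map (fun o => Char.ofNat o.toNat)).Nodup) :
    (solveLoop os (s, k)).1 = passF (skipFun s os k) s := by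
  induction os generalizing s k with
  | nil =>
    simp only [solveLoop, skipFun]
    exact (passF_nonpos _ (fun _ => le_refl 0) s).symm
  | cons o os ih =>
    rw [List.map_cons, List.nodup_cons] at hnd
    obtain ⟨hco, hnd'⟩ := hnd
    simp only [solveLoop]
    by_cases hk : 0 < k
    · rw [solveInner_eq _ _ _ hk]
      have ht0 : (0:Int) ≤ min k (s.count (Char.ofNat o.toNat) : Int) := by
        have : (0:Int) ≤ (s.count (Char.ofNat o.toNat) : Int) := Int.natCast_nonneg _
        omega
      by_cases hkt : k - min k (s.count (Char.ofNat o.toNat) : Int) = 0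
      · rw [if_pos (by simpa using hkt)]
        simp only [skipFun, if_neg (by omega : ¬ k ≤ 0)]
        rw [skipFun_nonpos s os _ (by omega)]
        congr 1
        funext y
        simp
      · rw [if_neg (by simpa using hkt)]
        rw [ih _ _ hnd']
        rw [skipFun_congr s _ os _ (fun o' ho' => count_passF _ _ (by
          have hne : Char.ofNat o'.toNat ≠ Char.ofNat o.toNat :=
            fun heq => hco (heq ▸ List.mem_map_of_mem ho')
          simp [hne]) s)]
        rw [passF_passF _ _ (fun y => skipFun_nonneg s os _ y)
          (fun y => by by_cases hy : y = Char.ofNat o.toNat <;> simp [hy] <;> omega)]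
        simp only [skipFun, if_neg (by omega : ¬ k ≤ 0)]
        congr 1
        funext y
        ring
    · rw [solveInner, dif_neg (fun hh => hk hh.1)]
      rw [skipFun_nonpos s (o :: os) k (by omega), passF_nonpos _ (fun _ => le_refl 0)]
      by_cases hk0 : k = 0
      · rw [if_pos (by simpa using hk0)]
      · rw [if_neg (by simpa using hk0), ih _ _ hnd',
          skipFun_nonpos s os k (by omega), passF_nonpos _ (fun _ => le_refl 0)]

lemma altSkip_eq (s : List Char) (os : List Int) (rem : Int) (sk : PySem.Dict Char Int)
    (hnd : (os.map (fun o => Char.ofNat o.toNat)).Nodup)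
    (hsk : ∀ o ∈ os, sk.getD (Char.ofNat o.toNat) 0 = 0) (x : Char) :
    (altSkip os (altCount s) rem sk).getD x 0 = sk.getD x 0 + skipFun s os rem x := by
  induction os generalizing rem sk with
  | nil =>
    simp only [altSkip, skipFun]
    omega
  | cons o os ih =>
    rw [List.map_cons, List.nodup_cons] at hnd
    obtain ⟨hco, hnd'⟩ := hnd
    simp only [altSkip]
    by_cases hrem : rem ≤ 0
    · rw [if_pos hrem, skipFun_nonpos s (o :: os) rem hrem]
      simp
    · rw [if_neg hrem]
      have hcnt : (altCount s).getD (Char.ofNat o.toNat) 0 = (s.count (Char.ofNat o.toNat) : Int) := by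
        rw [altCount, PySem.Dict.foldl_insert_getD_add_one_eq_counter, PySem.Dict.getD_counter]
      rw [hcnt]
      have ht0 : (0:Int) ≤ min rem (s.count (Char.ofNat o.toNat) : Int) := by
        have : (0:Int) ≤ (s.count (Char.ofNat o.toNat) : Int) := Int.natCast_nonneg _
        omega
      have h2 : ∀ o' ∈ os,
          (if 0 < min rem (s.count (Char.ofNat o.toNat) : Int) then
            sk.insert (Char.ofNat o.toNat) (min rem (s.count (Char.ofNat o.toNat) : Int)) else sk).getD
            (Char.ofNat o'.toNat) 0 = 0 := by
        intro o' ho'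
        have hne : Char.ofNat o'.toNat ≠ Char.ofNat o.toNat :=
          fun heq => hco (heq ▸ List.mem_map_of_mem ho')
        split_ifs
        · rw [PySem.Dict.getD_insert, if_neg hne]
          exact hsk o' (List.mem_cons_of_mem _ ho')
        · exact hsk o' (List.mem_cons_of_mem _ ho')
      rw [ih _ _ hnd' h2]
      simp only [skipFun, if_neg hrem]
      by_cases hx : x = Char.ofNat o.toNat
      · have h0 : sk.getD x 0 = 0 := by rw [hx]; exact hsk o List.mem_cons_self
        by_cases hpos : 0 < min rem (s.count (Char.ofNat o.toNat) : Int)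
        · rw [if_pos hpos, PySem.Dict.getD_insert, if_pos hx, h0, if_pos hx]
          omega
        · rw [if_neg hpos, h0, if_pos hx]
          omega
      · rw [if_neg hx]
        by_cases hpos : 0 < min rem (s.count (Char.ofNat o.toNat) : Int)
        · rw [if_pos hpos, PySem.Dict.getD_insert, if_neg hx]
          ring
        · rw [if_neg hpos]
          ring

lemma altPass_eq (l : List Char) (sk : PySem.Dict Char Int) :
    altPass sk l = passF (fun x => sk.getD x 0) l := by
  induction l generalizing sk with
  | nil => rfl
  | cons x xs ih =>
    by_cases hx : 0 < sk.getD x 0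
    · simp only [altPass, passF, if_pos hx, ih]
      congr 1
      funext y
      rw [PySem.Dict.getD_insert]
      by_cases hy : y = x <;> simp [Function.update, hy]
    · simp only [altPass, passF, if_neg hx, ih]

-- ===== VERDICT (by name: the statement is the Claim_ definition above) =====
theorem solve_spec : Claim_equal_solve := by
  intro s k _
  unfold Spec_solve solve solve_alt
  have hnd : ((PySem.List.pyRange 97 123 1).map (fun o => Char.ofNat o.toNat)).Nodup := by decide
  rw [solveLoop_eq _ _ _ hnd, altPass_eq]
  congr 1
  rw [show (fun x => (altSkip (PySem.List.pyRange 97 123 1) (altCount s.toList) k PySem.Dict.empty).getD x 0)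
        = skipFun s.toList (PySem.List.pyRange 97 123 1) k from ?_]
  · funext x
    rw [altSkip_eq s.toList _ k _ hnd (fun o _ => rfl) x]
    simp [PySem.Dict.empty, PySem.Dict.getD, PySem.Dict.get?]
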